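-- pv_equiv track=rewrite | github.com/libaibuaidufu/leetcode_python | leetcode/number-of-steps-to-reduce-a-number-to-zero.py | numberOfSteps_one
-- ===== SOURCE A (Python) =====
-- def numberOfSteps_one(num: int) -> int:
--     s = 0
--     while num > 0:
--         if num % 2 == 0:
--             num //= 2
--         else:
--             num -= 1
--         s += 1
--     return s
-- ===== SOURCE B (Python) =====
-- def numberOfSteps_one(num: int) -> int:
--     if num <= 0:
--         return 0
--     return num.bit_length() + bin(num).count("1") - 1
-- ===== Notes on version B (the rewrite author's own statement) =====
-- stated objective: faster
-- what changed: Replaces the step-by-step halving/decrementing loop with the closed form bit_length(num) + popcount(num) - 1 (guarded by num <= 0 -> 0).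
import Mathlib
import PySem

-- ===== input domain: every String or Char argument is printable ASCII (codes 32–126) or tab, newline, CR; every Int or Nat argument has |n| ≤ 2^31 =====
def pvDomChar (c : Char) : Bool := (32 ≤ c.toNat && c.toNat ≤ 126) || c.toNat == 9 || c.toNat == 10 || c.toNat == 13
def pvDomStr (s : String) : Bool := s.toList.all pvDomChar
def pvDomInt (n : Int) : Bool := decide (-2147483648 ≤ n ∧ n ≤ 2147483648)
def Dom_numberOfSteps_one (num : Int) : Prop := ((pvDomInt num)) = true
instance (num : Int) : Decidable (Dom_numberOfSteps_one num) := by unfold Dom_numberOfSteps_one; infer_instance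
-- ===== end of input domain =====

-- B replaces A's halving/decrementing loop by the closed form bitLength + bitCount - 1.

-- ===== PORT A =====
-- the while loop, carrying the counter s; terminates because num.toNat decreases
def numberOfSteps_one_go (num : Int) (s : Int) : Int :=
  if h : num > 0 then
    if PySem.Int.mod num 2 == 0 then
      numberOfSteps_one_go (PySem.Int.floordiv num 2) (s + 1)
    else
      numberOfSteps_one_go (num - 1) (s + 1)
  else s
termination_by num.toNat
decreasing_by
  · rw [PySem.Int.floordiv_eq_ediv_of_pos (by omega)]; omega
  · omega

def numberOfSteps_one (num : Int) : Int := numberOfSteps_one_go num 0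

-- ===== PORT B =====
def numberOfSteps_one_alt (num : Int) : Int :=
  if num ≤ 0 then 0
  else (PySem.Int.bitLength num : Int) + (PySem.Int.bitCount num : Int) - 1

-- ===== PRECONDITION & SPEC =====
def Spec_numberOfSteps_one (num : Int) (out : Int) : Prop := out = numberOfSteps_one_alt num
instance (num : Int) (out : Int) : Decidable (Spec_numberOfSteps_one num out) := by unfold Spec_numberOfSteps_one; infer_instance

-- ===== CLAIM (what is proved, stated in full; the proofs are below) =====
def Claim_equal_numberOfSteps_one : Prop := ∀ (num : Int), Dom_numberOfSteps_one num → Spec_numberOfSteps_one num (numberOfSteps_one num)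

-- ===== LEMMAS AND PROOFS =====

-- loop invariant: for positive num the loop returns s + bitLength num + bitCount num - 1
theorem numberOfSteps_one_go_eq (n : Nat) : ∀ (num s : Int), num.toNat = n → 0 < num →
    numberOfSteps_one_go num s
      = s + (PySem.Int.bitLength num : Int) + (PySem.Int.bitCount num : Int) - 1 := by
  induction n using Nat.strong_induction_on with
  | _ n ih =>
    intro num s hn hpos
    rw [numberOfSteps_one_go]
    simp only [hpos, dite_true]
    have hbl := PySem.Int.bitLength_of_pos (n := num) hpos
    have hbc := PySem.Int.bitCount_of_pos (n := num) hpos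
    have hfd : PySem.Int.floordiv num 2 = num / 2 :=
      PySem.Int.floordiv_eq_ediv_of_pos (by omega)
    have hmd : PySem.Int.mod num 2 = num % 2 :=
      PySem.Int.mod_eq_emod_of_pos (by omega)
    by_cases hev : PySem.Int.mod num 2 = 0
    · simp only [hev, beq_self_eq_true, if_true]
      rw [hfd]
      by_cases hhalf : 0 < num / 2
      · rw [ih (num / 2).toNat (by omega) _ _ rfl hhalf]
        rw [hbl, hbc, hfd, hev]
        push_cast
        omega
      · -- num / 2 ≤ 0 with num > 0 and num even forces num ∈ {1}, impossible (even)
        have : num = 1 := by omega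
        rw [hmd] at hev; omega
    · simp only [beq_iff_eq, hev, if_false]
      have hm1 : num % 2 = 1 := by rw [hmd] at hev; omega
      by_cases hone : num = 1
      · subst hone
        rw [numberOfSteps_one_go]
        norm_num
        rw [show (PySem.Int.bitLength 1 : Nat) = 1 from by decide,
            show (PySem.Int.bitCount 1 : Nat) = 1 from by decide]
        push_cast; ring
      · have hpos' : 0 < num - 1 := by omega
        rw [ih (num - 1).toNat (by omega) _ _ rfl hpos']
        -- num odd: num - 1 = 2 * (num / 2) with num / 2 > 0
        have hq : 0 < num / 2 := by omega
        have hbl' := PySem.Int.bitLength_of_pos (n := num - 1) hpos'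
        have hbc' := PySem.Int.bitCount_of_pos (n := num - 1) hpos'
        have hfd' : PySem.Int.floordiv (num - 1) 2 = num / 2 := by
          rw [PySem.Int.floordiv_eq_ediv_of_pos (by omega)]; omega
        have hmd' : PySem.Int.mod (num - 1) 2 = 0 := by
          rw [PySem.Int.mod_eq_emod_of_pos (by omega)]; omega
        rw [hbl', hbc', hbl, hbc, hfd, hfd', hmd', hmd, hm1]
        push_cast
        omega

-- ===== VERDICT (by name: the statement is the Claim_ definition above) =====
theorem numberOfSteps_one_spec : Claim_equal_numberOfSteps_one := by
  intro num _
  unfold Spec_numberOfSteps_one numberOfSteps_one numberOfSteps_one_alt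
  by_cases h : num ≤ 0
  · have h' : ¬ num > 0 := by omega
    rw [numberOfSteps_one_go]
    simp [h, h']
  · rw [numberOfSteps_one_go_eq num.toNat num 0 rfl (by omega), if_neg h]
    ring
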